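-- pv_equiv track=rewrite | github.com/carlosan2025/juris-agi-monorepo | apps/juris_edge/python/juris_agi/report/generator.py | _build_category_summaries
-- ===== SOURCE A (Python) =====
-- from typing import Dict, Any, List, Optional, Tuple
--
-- def _build_category_summaries(claims: List[Dict]) -> Dict[str, str]:
--     """Build summaries for each category from claims."""
--     summaries = {}
--
--     # Group claims
--     traction_claims = [c for c in claims if c.get("claim_type") == "traction"]
--     team_claims = [c for c in claims if c.get("claim_type") in ["team_quality", "team_composition"]]
--     market_claims = [c for c in claims if c.get("claim_type") == "market_scope"]
--     risk_claims = [c for c in claims if c.get("claim_type") in ["execution_risk", "regulatory_risk"]]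
--
--     # Traction summary
--     if traction_claims:
--         parts = []
--         for c in traction_claims[:3]:
--             field = c.get("field", "")
--             value = c.get("value", "")
--             parts.append(f"{field}: {value}")
--         summaries["traction"] = "; ".join(parts)
--
--     # Team summary
--     if team_claims:
--         parts = []
--         for c in team_claims[:3]:
--             field = c.get("field", "")
--             value = c.get("value", "")
--             parts.append(f"{field}: {value}")
--         summaries["team"] = "; ".join(parts)
--
--     # Market summary
--     if market_claims:
--         parts = []
--         for c in market_claims[:3]:
--             field = c.get("field", "")
--             value = c.get("value", "")
--             parts.append(f"{field}: {value}")
--         summaries["market"] = "; ".join(parts)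
--
--     # Risk summary
--     if risk_claims:
--         parts = []
--         for c in risk_claims[:3]:
--             field = c.get("field", "")
--             value = c.get("value", "")
--             parts.append(f"{field}: {value}")
--         summaries["risk"] = "; ".join(parts)
--
--     return summaries
-- ===== SOURCE B (Python) =====
-- _CATEGORY = {
--     "traction": "traction",
--     "team_quality": "team",
--     "team_composition": "team",
--     "market_scope": "market",
--     "execution_risk": "risk",
--     "regulatory_risk": "risk",
-- }
--
-- def _build_category_summaries(claims):
--     """Build summaries for each category from claims (single dispatch pass)."""
--     buckets = {"traction": [], "team": [], "market": [], "risk": []}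
--     for c in claims:
--         t = c.get("claim_type")
--         cat = _CATEGORY.get(t) if isinstance(t, str) else None
--         if cat is not None:
--             b = buckets[cat]
--             if len(b) < 3:
--                 b.append(f"{c.get('field', '')}: {c.get('value', '')}")
--     return {k: "; ".join(b) for k, b in buckets.items() if b}
-- ===== Notes on version B (the rewrite author's own statement) =====
-- stated objective: simpler
-- what changed: Replaces four separate filtering passes over the claims list (one per category) with a single dispatch pass that routes each claim through a constant claim_type-to-category table into per-category buckets capped at three entries, then emits the nonempty buckets in the fixed order.
import Mathlib
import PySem

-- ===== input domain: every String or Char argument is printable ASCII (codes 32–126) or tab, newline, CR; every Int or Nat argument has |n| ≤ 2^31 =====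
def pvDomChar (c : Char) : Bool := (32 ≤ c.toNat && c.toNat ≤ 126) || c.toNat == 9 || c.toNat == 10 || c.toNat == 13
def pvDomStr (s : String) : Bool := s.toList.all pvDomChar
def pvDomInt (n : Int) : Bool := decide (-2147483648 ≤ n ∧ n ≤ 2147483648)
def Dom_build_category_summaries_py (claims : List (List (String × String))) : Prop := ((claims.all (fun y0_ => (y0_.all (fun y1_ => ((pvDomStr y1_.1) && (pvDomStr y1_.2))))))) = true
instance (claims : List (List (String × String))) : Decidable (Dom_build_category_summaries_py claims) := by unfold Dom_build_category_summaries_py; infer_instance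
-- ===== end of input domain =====

-- B builds the four category buckets in ONE dispatch pass over the claims (via a
-- constant claim_type → category table, capping each bucket at three entries)
-- instead of A's four separate filtering passes; same return value.

-- shared helpers: Python dict.get on an association list (lookup = first match)
def pvDget? (d : List (String × String)) (k : String) : Option String :=
  (d.find? (fun p => p.1 == k)).map (·.2)

def pvDgetD (d : List (String × String)) (k dflt : String) : String :=
  (pvDget? d k).getD dflt

-- f"{field}: {value}" with c.get("field",""), c.get("value","")
def pvFmt (c : List (String × String)) : String :=
  pvDgetD c "field" "" ++ ": " ++ pvDgetD c "value" ""

-- ===== PORT A =====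
def build_category_summaries_py (claims : List (List (String × String))) : List (String × String) :=
  let traction := claims.filter (fun c => pvDget? c "claim_type" == some "traction")
  let team := claims.filter (fun c =>
    pvDget? c "claim_type" == some "team_quality" || pvDget? c "claim_type" == some "team_composition")
  let market := claims.filter (fun c => pvDget? c "claim_type" == some "market_scope")
  let risk := claims.filter (fun c =>
    pvDget? c "claim_type" == some "execution_risk" || pvDget? c "claim_type" == some "regulatory_risk")
  let s0 : List (String × String) := []
  let s1 := if traction.isEmpty then s0 else
    s0 ++ [("traction", PySem.Str.join "; " ((traction.take 3).map pvFmt))]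
  let s2 := if team.isEmpty then s1 else
    s1 ++ [("team", PySem.Str.join "; " ((team.take 3).map pvFmt))]
  let s3 := if market.isEmpty then s2 else
    s2 ++ [("market", PySem.Str.join "; " ((market.take 3).map pvFmt))]
  if risk.isEmpty then s3 else
    s3 ++ [("risk", PySem.Str.join "; " ((risk.take 3).map pvFmt))]

-- ===== PORT B =====
def pvCategory : List (String × String) :=
  [("traction", "traction"), ("team_quality", "team"), ("team_composition", "team"),
   ("market_scope", "market"), ("execution_risk", "risk"), ("regulatory_risk", "risk")]

-- b.append(...) guarded by len(b) < 3
def pvBump (b : List String) (s : String) : List String :=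
  if b.length < 3 then b ++ [s] else b

-- one loop iteration: dispatch the claim into its bucket (or drop it)
def pvStep (st : List String × List String × List String × List String)
    (c : List (String × String)) : List String × List String × List String × List String :=
  match pvDget? c "claim_type" with
  | none => st
  | some t =>
    match pvDget? pvCategory t with
    | none => st
    | some cat =>
      if cat == "traction" then (pvBump st.1 (pvFmt c), st.2.1, st.2.2.1, st.2.2.2)
      else if cat == "team" then (st.1, pvBump st.2.1 (pvFmt c), st.2.2.1, st.2.2.2)
      else if cat == "market" then (st.1, st.2.1, pvBump st.2.2.1 (pvFmt c), st.2.2.2)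
      else (st.1, st.2.1, st.2.2.1, pvBump st.2.2.2 (pvFmt c))

def pvEmit (name : String) (b : List String) (acc : List (String × String)) :
    List (String × String) :=
  if b.isEmpty then acc else acc ++ [(name, PySem.Str.join "; " b)]

def build_category_summaries_py_alt (claims : List (List (String × String))) :
    List (String × String) :=
  let st := claims.foldl pvStep ([], [], [], [])
  pvEmit "risk" st.2.2.2 (pvEmit "market" st.2.2.1 (pvEmit "team" st.2.1 (pvEmit "traction" st.1 [])))

-- ===== PRECONDITION & SPEC =====
def Spec_build_category_summaries_py (claims : List (List (String × String))) (out : List (String × String)) : Prop := out = build_category_summaries_py_alt claims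
instance (claims : List (List (String × String))) (out : List (String × String)) : Decidable (Spec_build_category_summaries_py claims out) := by unfold Spec_build_category_summaries_py; infer_instance

-- ===== CLAIM (what is proved, stated in full; the proofs are below) =====
def Claim_equal_build_category_summaries_py : Prop := ∀ (claims : List (List (String × String))), Dom_build_category_summaries_py claims → Spec_build_category_summaries_py claims (build_category_summaries_py claims)

-- ===== LEMMAS AND PROOFS =====

-- B's tuple fold splits into four independent bucket folds (one claim feeds at most one bucket)
lemma pvStep_decomp (claims : List (List (String × String)))
    (tr te ma ri : List String) :
    claims.foldl pvStep (tr, te, ma, ri) =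
      (claims.foldl (fun b c => if pvDget? c "claim_type" == some "traction" then pvBump b (pvFmt c) else b) tr,
       claims.foldl (fun b c => if pvDget? c "claim_type" == some "team_quality" || pvDget? c "claim_type" == some "team_composition" then pvBump b (pvFmt c) else b) te,
       claims.foldl (fun b c => if pvDget? c "claim_type" == some "market_scope" then pvBump b (pvFmt c) else b) ma,
       claims.foldl (fun b c => if pvDget? c "claim_type" == some "execution_risk" || pvDget? c "claim_type" == some "regulatory_risk" then pvBump b (pvFmt c) else b) ri) := by
  induction claims generalizing tr te ma ri with
  | nil => rfl
  | cons c cs ih =>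
    simp only [List.foldl_cons]
    rw [show pvStep (tr, te, ma, ri) c =
        ((if pvDget? c "claim_type" == some "traction" then pvBump tr (pvFmt c) else tr),
         (if pvDget? c "claim_type" == some "team_quality" || pvDget? c "claim_type" == some "team_composition" then pvBump te (pvFmt c) else te),
         (if pvDget? c "claim_type" == some "market_scope" then pvBump ma (pvFmt c) else ma),
         (if pvDget? c "claim_type" == some "execution_risk" || pvDget? c "claim_type" == some "regulatory_risk" then pvBump ri (pvFmt c) else ri)) from ?_, ih]
    unfold pvStep
    rcases h : pvDget? c "claim_type" with _ | t
    · simp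
    · by_cases h1 : t = "traction"
      · subst h1; simp [pvCategory, pvDget?]
      · by_cases h2 : t = "team_quality"
        · subst h2; simp [pvCategory, pvDget?]
        · by_cases h3 : t = "team_composition"
          · subst h3; simp [pvCategory, pvDget?]
          · by_cases h4 : t = "market_scope"
            · subst h4; simp [pvCategory, pvDget?]
            · by_cases h5 : t = "execution_risk"
              · subst h5; simp [pvCategory, pvDget?]
              · by_cases h6 : t = "regulatory_risk"
                · subst h6; simp [pvCategory, pvDget?]
                · simp [pvCategory, pvDget?, h1, h2, h3, h4, h5, h6, Ne.symm h1, Ne.symm h2, Ne.symm h3, Ne.symm h4, Ne.symm h5, Ne.symm h6]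

-- a capped-append fold is the (3 - |b|)-prefix of the mapped filter
lemma pvFoldl_bump (p : List (String × String) → Bool)
    (claims : List (List (String × String))) (b : List String) :
    claims.foldl (fun b c => if p c then pvBump b (pvFmt c) else b) b
      = b ++ ((claims.filter p).map pvFmt).take (3 - b.length) := by
  induction claims generalizing b with
  | nil => simp
  | cons c cs ih =>
    simp only [List.foldl_cons, List.filter_cons]
    by_cases hp : p c
    · simp only [hp, ih]
      unfold pvBump
      by_cases hb : b.length < 3
      · rw [if_pos hb]
        simp [show 3 - b.length = (3 - (b.length + 1)) + 1 from by omega, List.append_assoc]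
      · rw [if_neg hb]
        simp [show 3 - b.length = 0 by omega]
    · simp [hp, ih]

lemma pvIsEmpty_take3_map (xs : List (List (String × String))) :
    ((xs.map pvFmt).take 3).isEmpty = xs.isEmpty := by
  cases xs <;> rfl

theorem build_category_summaries_py_equal (claims : List (List (String × String))) :
    build_category_summaries_py claims = build_category_summaries_py_alt claims := by
  unfold build_category_summaries_py build_category_summaries_py_alt
  rw [pvStep_decomp, pvFoldl_bump, pvFoldl_bump, pvFoldl_bump, pvFoldl_bump]
  simp only [List.nil_append, List.length_nil, Nat.sub_zero, pvEmit,
    pvIsEmpty_take3_map, List.map_take]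

-- ===== VERDICT (by name: the statement is the Claim_ definition above) =====
theorem build_category_summaries_py_spec : Claim_equal_build_category_summaries_py := by
  intro claims _
  unfold Spec_build_category_summaries_py
  exact build_category_summaries_py_equal claims
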